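-- pv_equiv track=rewrite | github.com/GuiCaDog/AlgorithmContest | Week3/candystore/candy.py | buildMaxRelativeDistances
-- ===== SOURCE A (Python) =====
-- def buildMaxRelativeDistances(vther, me, tree, dtnces):
--
--     for i in range(0, len(tree[me])):
--         node = tree[me][i]
--         # if I'm a son, and I'm visiting my father, I should note that this is my father.
--         #I should not ask my father for his max distance
--         if node == vther:
--             # also, if I am a son, and I can just visit my father, I am a leaf
--             if len(tree[me]) == 1:
--                 dtnces[me] = [[None, 0]]
--         else:
--             lgstThruNode = 0
--             #son is going to build his max distances
--             sonDists = buildMaxRelativeDistances(me, node, tree, dtnces)[node]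
--             maxes = []
--             for d in sonDists:
--                 maxes.append(d[1])
--             lgstThruNode = 1 + max(maxes)
--             dtnces[me]= dtnces.get(me,[])
--             dtnces[me].append([node, lgstThruNode])
--
--             #dtnces[node] = dtnces.get(node,[])
--             #dtnces[node].append(prof)
--
--
--     return dtnces
-- ===== SOURCE B (Python) =====
-- def buildMaxRelativeDistances(vther, me, tree, dtnces):
--     # Iterative explicit-stack action machine replacing the recursion.
--     # Note: mutates dtnces in place, exactly as the original does.
--     stack = [('call', vther, me)]
--     while stack:
--         act = stack.pop()
--         if act[0] == 'call':
--             _, parent, node = act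
--             acts = []
--             for c in tree[node]:
--                 if c == parent:
--                     acts.append(('leaf', node))
--                 else:
--                     acts.append(('call', node, c))
--                     acts.append(('post', node, c))
--             stack.extend(reversed(acts))
--         elif act[0] == 'leaf':
--             node = act[1]
--             if len(tree[node]) == 1:
--                 dtnces[node] = [[None, 0]]
--         else:
--             _, node, c = act
--             lgst = 1 + max(e[1] for e in dtnces[c])
--             dtnces[node] = dtnces.get(node, [])
--             dtnces[node].append([c, lgst])
--     return dtnces
-- ===== Notes on version B (the rewrite author's own statement) =====
-- stated objective: alternative
-- what changed: The recursive DFS is replaced by an iterative explicit-stack action machine (call/leaf/post actions) whose while-loop performs exactly the same dict reads, sentinel writes and appends in the same order.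
import Mathlib
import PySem

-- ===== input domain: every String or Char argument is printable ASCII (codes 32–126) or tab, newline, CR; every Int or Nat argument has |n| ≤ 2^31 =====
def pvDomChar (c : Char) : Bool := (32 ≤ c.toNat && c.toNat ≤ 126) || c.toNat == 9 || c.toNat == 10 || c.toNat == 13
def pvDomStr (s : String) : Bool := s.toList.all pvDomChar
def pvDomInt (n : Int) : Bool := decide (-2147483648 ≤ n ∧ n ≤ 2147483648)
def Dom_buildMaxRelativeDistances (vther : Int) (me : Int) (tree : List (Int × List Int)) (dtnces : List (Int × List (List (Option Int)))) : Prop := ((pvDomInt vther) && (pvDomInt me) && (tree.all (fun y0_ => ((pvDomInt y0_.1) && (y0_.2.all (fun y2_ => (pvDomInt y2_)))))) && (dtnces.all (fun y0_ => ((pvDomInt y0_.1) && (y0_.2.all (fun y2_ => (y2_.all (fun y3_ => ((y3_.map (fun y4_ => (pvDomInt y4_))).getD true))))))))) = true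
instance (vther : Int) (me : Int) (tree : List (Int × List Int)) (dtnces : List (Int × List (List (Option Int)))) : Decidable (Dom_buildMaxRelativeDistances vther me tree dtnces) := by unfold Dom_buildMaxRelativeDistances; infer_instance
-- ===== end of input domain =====

-- B replaces A's recursive DFS by an iterative explicit-stack action machine that performs the same
-- dict operations in the same order (objective: alternative).  Both Pythons mutate `dtnces` in
-- place identically; the equivalence proved here is about the returned dict.

-- ===== PORT A =====
-- d[1] of a distance entry; the default branches are where Python raises (excluded by Pre_)
def pvSecond (d : List (Option Int)) : Int :=
  match PySem.List.pyGet? d 1 with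
  | some (some v) => v
  | _ => 0

-- max(maxes); [] is where Python raises ValueError (excluded by Pre_)
def pvMaxList (l : List Int) : Int :=
  match l with
  | [] => 0
  | x :: xs => xs.foldl max x

mutual
-- literal transliteration of A's recursion; fuel only makes it total (never exhausted under Pre_)
def goA (f : Nat) (vther me : Int) (tree : PySem.Dict Int (List Int))
    (dt : PySem.Dict Int (List (List (Option Int)))) : PySem.Dict Int (List (List (Option Int))) :=
  match f with
  | 0 => dt
  | Nat.succ f' =>
      let nbrs := (PySem.Dict.get? tree me).getD []
      goLoopA f' vther me tree nbrs nbrs dt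
  termination_by (f, 0, 0)

-- the `for i in range(0, len(tree[me]))` loop of A, running over the remaining suffix `sub`
def goLoopA (f : Nat) (vther me : Int) (tree : PySem.Dict Int (List Int)) (nbrs : List Int)
    (sub : List Int) (dt : PySem.Dict Int (List (List (Option Int)))) :
    PySem.Dict Int (List (List (Option Int))) :=
  match sub with
  | [] => dt
  | node :: rest =>
      if node = vther then
        goLoopA f vther me tree nbrs rest
          (if nbrs.length = 1 then PySem.Dict.insert dt me [[none, some 0]] else dt)
      else
        let dt' := goA f me node tree dt
        let sonDists := (PySem.Dict.get? dt' node).getD []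
        let lgst := 1 + pvMaxList (sonDists.map pvSecond)
        goLoopA f vther me tree nbrs rest
          (PySem.Dict.insert dt' me (((PySem.Dict.get? dt' me).getD []) ++ [[some node, some lgst]]))
  termination_by (f, 1, sub.length)
end

def buildMaxRelativeDistances (vther : Int) (me : Int) (tree : List (Int × List Int)) (dtnces : List (Int × List (List (Option Int)))) : List (Int × List (List (Option Int))) :=
  (goA (3 * tree.length + 6) vther me ⟨tree⟩ ⟨dtnces⟩).items

-- ===== PORT B =====
inductive PvAction where
  | call : Int → Int → PvAction
  | leaf : Int → PvAction
  | post : Int → Int → PvAction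
deriving DecidableEq, Repr

-- the action list a popped ('call', parent, node) pushes (Source B builds `acts`, extends reversed)
def pvExpand (parent node : Int) (nbrs : List Int) : List PvAction :=
  nbrs.flatMap (fun c =>
    if c = parent then [PvAction.leaf node] else [PvAction.call node c, PvAction.post node c])

-- literal transliteration of Source B's `while stack` loop; the stack top is the list head.
-- fuel only makes the loop total (never exhausted under Pre_, proved below).
def runB (f : Nat) (tree : PySem.Dict Int (List Int)) (stack : List PvAction)
    (dt : PySem.Dict Int (List (List (Option Int)))) :
    Option (PySem.Dict Int (List (List (Option Int)))) :=
  match stack with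
  | [] => some dt
  | PvAction.call parent node :: rest =>
      match f with
      | 0 => none
      | Nat.succ f' =>
          runB f' tree (pvExpand parent node ((PySem.Dict.get? tree node).getD []) ++ rest) dt
  | PvAction.leaf node :: rest =>
      runB f tree rest
        (if ((PySem.Dict.get? tree node).getD []).length = 1
         then PySem.Dict.insert dt node [[none, some 0]] else dt)
  | PvAction.post node c :: rest =>
      let sonDists := (PySem.Dict.get? dt c).getD []
      let lgst := 1 + pvMaxList (sonDists.map pvSecond)
      runB f tree rest
        (PySem.Dict.insert dt node (((PySem.Dict.get? dt node).getD []) ++ [[some c, some lgst]]))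
termination_by (f, stack.length)

def pvTotalDeg (tree : List (Int × List Int)) : Nat :=
  tree.foldl (fun a p => a + p.2.length) 0

def buildMaxRelativeDistances_alt (vther : Int) (me : Int) (tree : List (Int × List Int)) (dtnces : List (Int × List (List (Option Int)))) : List (Int × List (List (Option Int))) :=
  ((runB ((pvTotalDeg tree + 1) ^ (3 * tree.length + 6)) ⟨tree⟩ [PvAction.call vther me] ⟨dtnces⟩).getD ⟨dtnces⟩).items

-- ===== PRECONDITION & SPEC =====
-- BFS levels of the nodes reachable from `me` — a plain graph-shape computation used only to state
-- that the input graph is a tree rooted at `me`; it is not either port's algorithm.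
def pvLvlStep (tree : List (Int × List Int)) (acc : PySem.Dict Int Nat) : PySem.Dict Int Nat :=
  tree.foldl (fun acc p =>
    match PySem.Dict.get? acc p.1 with
    | none => acc
    | some v =>
        p.2.foldl (fun acc c =>
          match PySem.Dict.get? acc c with
          | some _ => acc
          | none => PySem.Dict.insert acc c (v + 1)) acc) acc

def pvLevels (tree : List (Int × List Int)) (me : Int) : PySem.Dict Int Nat :=
  (List.range tree.length).foldl (fun acc _ => pvLvlStep tree acc) ⟨[(me, 0)]⟩

def pvLvl (tree : List (Int × List Int)) (me : Int) (n : Int) : Option Nat :=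
  PySem.Dict.get? (pvLevels tree me) n

-- Pre_ restricts to the natural domain of this DFS, two closed-form shapes: either every neighbour
-- of `me` equals `vther` (the walk touches nothing else), or the reachable part of the graph is a
-- tree rooted at `me` (neighbours present, adjacency symmetric, BFS levels of adjacent nodes
-- differing by exactly 1, at most one neighbour closer to the root) whose leaves may also be
-- self-loop nodes `c : [c]`, with accumulator entries that are read by the walk well-shaped
-- (length ≥ 2 with an int at index 1).  On anything else Python A raises (KeyError / ValueError /
-- TypeError / IndexError) or recurses forever — except for a few degenerate non-tree inputs
-- (e.g. doubled self-loop edges) on which A still returns and B returns the same value, but which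
-- the intended tree walk never sees.
def Pre_buildMaxRelativeDistances (vther : Int) (me : Int) (tree : List (Int × List Int)) (dtnces : List (Int × List (List (Option Int)))) : Prop :=
  (PySem.Dict.get? (⟨tree⟩ : PySem.Dict Int (List Int)) me).isSome = true ∧
  ((∀ c ∈ (PySem.Dict.get? (⟨tree⟩ : PySem.Dict Int (List Int)) me).getD [], c = vther) ∨
   (pvLvl tree me me = some 0 ∧
    (∀ e ∈ (pvLevels tree me).items, e.2 + 1 ≤ (pvLevels tree me).items.length) ∧
    (pvLevels tree me).items.length ≤ tree.length + 1 ∧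
    (∀ pair ∈ dtnces,
      ((pvLvl tree me pair.1).isSome = true ∧ pair.1 ≠ me ∧
        ¬ PySem.Dict.get? (⟨tree⟩ : PySem.Dict Int (List Int)) pair.1 = some [pair.1]) →
      ∀ d ∈ pair.2, 2 ≤ d.length ∧ (d.getD 1 none).isSome = true) ∧
    (∀ pair ∈ tree, (pvLvl tree me pair.1).isSome = true →
      (∀ c ∈ pair.2, ¬(pair.1 = me ∧ c = vther) →
        (PySem.Dict.get? (⟨tree⟩ : PySem.Dict Int (List Int)) c = some [c] ∨
         ((PySem.Dict.get? (⟨tree⟩ : PySem.Dict Int (List Int)) c).isSome = true ∧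
          pair.1 ∈ (PySem.Dict.get? (⟨tree⟩ : PySem.Dict Int (List Int)) c).getD [] ∧
          (pvLvl tree me c = some ((pvLvl tree me pair.1).getD 0 + 1) ∨
           ((pvLvl tree me pair.1).getD 0 ≠ 0 ∧
            pvLvl tree me c = some ((pvLvl tree me pair.1).getD 0 - 1)))))) ∧
      (pair.2.filter (fun c =>
          match pvLvl tree me c, pvLvl tree me pair.1 with
          | some lc, some lp => decide (lc < lp)
          | _, _ => false)).length ≤ 1)))

instance (vther : Int) (me : Int) (tree : List (Int × List Int)) (dtnces : List (Int × List (List (Option Int)))) : Decidable (Pre_buildMaxRelativeDistances vther me tree dtnces) := by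
  unfold Pre_buildMaxRelativeDistances; infer_instance

def pvWitness_buildMaxRelativeDistances : Int × Int × (List (Int × List Int)) × (List (Int × List (List (Option Int)))) :=
  (-1, 0, [(0, [1]), (1, [0, 2]), (2, [1])], [])

def Spec_buildMaxRelativeDistances (vther : Int) (me : Int) (tree : List (Int × List Int)) (dtnces : List (Int × List (List (Option Int)))) (out : List (Int × List (List (Option Int)))) : Prop := out = buildMaxRelativeDistances_alt vther me tree dtnces
instance (vther : Int) (me : Int) (tree : List (Int × List Int)) (dtnces : List (Int × List (List (Option Int)))) (out : List (Int × List (List (Option Int)))) : Decidable (Spec_buildMaxRelativeDistances vther me tree dtnces out) := by unfold Spec_buildMaxRelativeDistances; infer_instance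

-- ===== CLAIM (what is proved, stated in full; the proofs are below) =====
def Claim_equal_buildMaxRelativeDistances : Prop := ∀ (vther : Int) (me : Int) (tree : List (Int × List Int)) (dtnces : List (Int × List (List (Option Int)))), Dom_buildMaxRelativeDistances vther me tree dtnces → Pre_buildMaxRelativeDistances vther me tree dtnces → Spec_buildMaxRelativeDistances vther me tree dtnces (buildMaxRelativeDistances vther me tree dtnces)

-- ===== LEMMAS AND PROOFS =====

theorem pvWitness_ok :
    Dom_buildMaxRelativeDistances pvWitness_buildMaxRelativeDistances.1 pvWitness_buildMaxRelativeDistances.2.1 pvWitness_buildMaxRelativeDistances.2.2.1 pvWitness_buildMaxRelativeDistances.2.2.2 ∧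
    Pre_buildMaxRelativeDistances pvWitness_buildMaxRelativeDistances.1 pvWitness_buildMaxRelativeDistances.2.1 pvWitness_buildMaxRelativeDistances.2.2.1 pvWitness_buildMaxRelativeDistances.2.2.2 := by
  decide

-- one-step equations of the two programs (WF recursion hides them from plain `simp`)
theorem goA_succ (f : Nat) (vther me : Int) (tree : PySem.Dict Int (List Int)) (dt : PySem.Dict Int (List (List (Option Int)))) :
    goA (f + 1) vther me tree dt =
      goLoopA f vther me tree ((PySem.Dict.get? tree me).getD []) ((PySem.Dict.get? tree me).getD []) dt := by
  rw [goA]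

theorem goLoopA_nil (f : Nat) (vther me : Int) (tree : PySem.Dict Int (List Int)) (nbrs : List Int) (dt : PySem.Dict Int (List (List (Option Int)))) :
    goLoopA f vther me tree nbrs [] dt = dt := by
  rw [goLoopA]

theorem goLoopA_cons (f : Nat) (vther me : Int) (tree : PySem.Dict Int (List Int)) (nbrs : List Int) (node : Int) (rest : List Int) (dt : PySem.Dict Int (List (List (Option Int)))) :
    goLoopA f vther me tree nbrs (node :: rest) dt =
      (if node = vther then
        goLoopA f vther me tree nbrs rest
          (if nbrs.length = 1 then PySem.Dict.insert dt me [[none, some 0]] else dt)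
      else
        goLoopA f vther me tree nbrs rest
          (PySem.Dict.insert (goA f me node tree dt) me
            (((PySem.Dict.get? (goA f me node tree dt) me).getD []) ++
              [[some node, some (1 + pvMaxList (((PySem.Dict.get? (goA f me node tree dt) node).getD []).map pvSecond))]]))) := by
  rw [goLoopA]

theorem runB_nil (f : Nat) (tree : PySem.Dict Int (List Int)) (dt : PySem.Dict Int (List (List (Option Int)))) :
    runB f tree [] dt = some dt := by
  rw [runB]

theorem runB_call (f : Nat) (tree : PySem.Dict Int (List Int)) (p n : Int) (rest : List PvAction) (dt : PySem.Dict Int (List (List (Option Int)))) :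
    runB (f + 1) tree (PvAction.call p n :: rest) dt =
      runB f tree (pvExpand p n ((PySem.Dict.get? tree n).getD []) ++ rest) dt := by
  rw [runB]

theorem runB_leaf (f : Nat) (tree : PySem.Dict Int (List Int)) (n : Int) (rest : List PvAction) (dt : PySem.Dict Int (List (List (Option Int)))) :
    runB f tree (PvAction.leaf n :: rest) dt =
      runB f tree rest
        (if ((PySem.Dict.get? tree n).getD []).length = 1
         then PySem.Dict.insert dt n [[none, some 0]] else dt) := by
  rw [runB]

theorem runB_post (f : Nat) (tree : PySem.Dict Int (List Int)) (n c : Int) (rest : List PvAction) (dt : PySem.Dict Int (List (List (Option Int)))) :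
    runB f tree (PvAction.post n c :: rest) dt =
      runB f tree rest
        (PySem.Dict.insert dt n (((PySem.Dict.get? dt n).getD []) ++
          [[some c, some (1 + pvMaxList (((PySem.Dict.get? dt c).getD []).map pvSecond))]])) := by
  rw [runB]

-- runB is fuel-monotone on successful runs
theorem pvMono_one (f : Nat) (tree : PySem.Dict Int (List Int)) (st : List PvAction)
    (dt r : PySem.Dict Int (List (List (Option Int))))
    (h : runB f tree st dt = some r) : runB (f + 1) tree st dt = some r := by
  fun_induction runB f tree st dt
  · simpa [runB_nil] using h
  · simp_all
  · rename_i ih; rw [runB_call]; exact ih h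
  · rename_i ih; rw [runB_leaf]; exact ih h
  · rename_i ih; rw [runB_post]; exact ih h

theorem pvMono (f k : Nat) (tree : PySem.Dict Int (List Int)) (st : List PvAction)
    (dt r : PySem.Dict Int (List (List (Option Int))))
    (h : runB f tree st dt = some r) : runB (f + k) tree st dt = some r := by
  induction k with
  | zero => exact h
  | succ k ih => exact pvMono_one _ _ _ _ _ ih

-- a successful Dict lookup comes from a pair of the underlying association list
theorem pvGet?_mem {ν : Type} (l : List (Int × ν)) (k : Int) (v : ν)
    (h : PySem.Dict.get? (⟨l⟩ : PySem.Dict Int ν) k = some v) : (k, v) ∈ l := by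
  unfold PySem.Dict.get? at h
  rcases hf : List.find? (fun p => p.1 == k) l with _ | p
  · rw [hf] at h; simp at h
  · rw [hf] at h
    have hmem := List.mem_of_find?_eq_some hf
    have hkey := List.find?_some hf
    simp at h hkey
    have : p = (k, v) := by cases p; simp_all
    rwa [this] at hmem

theorem pvFoldl_len (l : List (Int × List Int)) (acc : Nat) :
    l.foldl (fun a q => a + q.2.length) acc = acc + l.foldl (fun a q => a + q.2.length) 0 := by
  induction l generalizing acc with
  | nil => simp
  | cons q t ih =>
      rw [List.foldl_cons, List.foldl_cons, ih (acc + q.2.length), ih (0 + q.2.length)]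
      omega

-- the neighbour list of any node is no longer than the total degree
theorem pvDeg_le (tree : List (Int × List Int)) (k : Int) (ns : List Int)
    (h : (k, ns) ∈ tree) : ns.length ≤ pvTotalDeg tree := by
  induction tree with
  | nil => cases h
  | cons p t ih =>
      unfold pvTotalDeg at *
      rw [List.foldl_cons, pvFoldl_len]
      rcases List.mem_cons.mp h with h | h
      · subst h; simp
      · have := ih h; omega

-- two distinct members of a filtered list force its length past 1
theorem pvTwoMem {α : Type} {l : List α} {p : α → Bool} {a b : α}
    (ha : a ∈ l.filter p) (hb : b ∈ l.filter p) (hne : a ≠ b) :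
    2 ≤ (l.filter p).length := by
  rcases hF : l.filter p with _ | ⟨x, t1⟩
  · rw [hF] at ha; cases ha
  · rcases t1 with _ | ⟨y, t2⟩
    · rw [hF] at ha hb
      have h1 := List.mem_singleton.mp ha
      have h2 := List.mem_singleton.mp hb
      exact absurd (h1.trans h2.symm) hne
    · simp only [List.length_cons]; omega

-- in the trivial shape (every neighbour of `me` is `vther`) both programs do the same
-- sequence of conditional sentinel writes
theorem pvTriv (vther me : Int) (tree : List (Int × List Int)) (ns : List Int)
    (hns : PySem.Dict.get? (⟨tree⟩ : PySem.Dict Int (List Int)) me = some ns) :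
    ∀ (sub : List Int), (∀ c ∈ sub, c = vther) →
    ∀ (f fB : Nat) (rest : List PvAction) (dt : PySem.Dict Int (List (List (Option Int)))),
      runB fB ⟨tree⟩ (pvExpand vther me sub ++ rest) dt =
        runB fB ⟨tree⟩ rest (goLoopA f vther me ⟨tree⟩ ns sub dt) := by
  intro sub
  induction sub with
  | nil =>
      intro _ f fB rest dt
      rw [goLoopA_nil]
      simp [pvExpand]
  | cons c sub' ih =>
      intro hall f fB rest dt
      have hc : c = vther := hall c (List.mem_cons_self ..)
      have hexp : pvExpand vther me (c :: sub') =
          PvAction.leaf me :: pvExpand vther me sub' := by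
        simp [pvExpand, hc]
      rw [hexp, goLoopA_cons, if_pos hc, List.cons_append]
      refine (runB_leaf _ _ _ _ _).trans ?_
      rw [hns]
      simp only [Option.getD_some]
      exact ih (fun x hx => hall x (List.mem_cons_of_mem _ hx)) f fB rest
        (if ns.length = 1 then PySem.Dict.insert dt me [[none, some 0]] else dt)

-- a self-loop leaf `c : [c]` reached from itself: A's inner call just writes the sentinel
theorem pvSelfInner (tree : List (Int × List Int)) (f : Nat) (hf : 1 ≤ f) (c : Int)
    (hc : PySem.Dict.get? (⟨tree⟩ : PySem.Dict Int (List Int)) c = some [c])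
    (dt : PySem.Dict Int (List (List (Option Int)))) :
    goA f c c ⟨tree⟩ dt = PySem.Dict.insert dt c [[none, some 0]] := by
  obtain ⟨g, rfl⟩ : ∃ g, f = g + 1 := ⟨f - 1, by omega⟩
  rw [goA_succ, hc]
  simp only [Option.getD_some]
  rw [goLoopA_cons, if_pos rfl]
  simp only [List.length_cons, List.length_nil, if_true]
  rw [goLoopA_nil]

-- a self-loop leaf processed as a child: both programs write the sentinel and one append
theorem pvSelfCall (tree : List (Int × List Int)) (f : Nat) (hf : 2 ≤ f) (q c : Int)
    (hc : PySem.Dict.get? (⟨tree⟩ : PySem.Dict Int (List Int)) c = some [c]) :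
    ∀ (dt : PySem.Dict Int (List (List (Option Int)))) (rest : List PvAction) (fB : Nat)
      (r : PySem.Dict Int (List (List (Option Int)))),
      runB fB ⟨tree⟩ rest (goA f q c ⟨tree⟩ dt) = some r →
      runB (fB + (pvTotalDeg tree + 1) ^ f) ⟨tree⟩ (PvAction.call q c :: rest) dt = some r := by
  intro dt rest fB r hrun
  have hD : 1 ≤ pvTotalDeg tree := by
    have := pvDeg_le tree c [c] (pvGet?_mem tree c [c] hc)
    simpa using this
  have hX : 4 ≤ (pvTotalDeg tree + 1) ^ f :=
    calc (4 : Nat) = 2 ^ 2 := rfl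
    _ ≤ 2 ^ f := Nat.pow_le_pow_right (by omega) hf
    _ ≤ (pvTotalDeg tree + 1) ^ f := Nat.pow_le_pow_left (by omega) f
  by_cases hq : c = q
  · -- called from itself (a self-loop at the root of the sub-walk)
    subst hq
    rw [pvSelfInner tree f (by omega) c hc dt] at hrun
    have hk2 : fB + (pvTotalDeg tree + 1) ^ f = (fB + ((pvTotalDeg tree + 1) ^ f - 1)) + 1 := by
      omega
    rw [hk2]
    refine (runB_call _ _ _ _ _ _).trans ?_
    rw [hc]
    simp only [Option.getD_some]
    have hexp : pvExpand c c [c] = [PvAction.leaf c] := by simp [pvExpand]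
    rw [hexp, List.cons_append, List.nil_append]
    refine (runB_leaf _ _ _ _ _).trans ?_
    rw [hc]
    simp only [Option.getD_some, List.length_cons, List.length_nil, if_true]
    exact pvMono _ _ _ _ _ _ hrun
  · -- called from a genuine parent q ≠ c
    obtain ⟨g, rfl⟩ : ∃ g, f = g + 1 := ⟨f - 1, by omega⟩
    rw [goA_succ, hc] at hrun
    simp only [Option.getD_some] at hrun
    rw [goLoopA_cons, if_neg hq, goLoopA_nil] at hrun
    rw [pvSelfInner tree g (by omega) c hc dt] at hrun
    have hk2 : fB + (pvTotalDeg tree + 1) ^ (g + 1) =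
        ((fB + ((pvTotalDeg tree + 1) ^ (g + 1) - 2)) + 1) + 1 := by omega
    rw [hk2]
    refine (runB_call _ _ _ _ _ _).trans ?_
    rw [hc]
    simp only [Option.getD_some]
    have hexp : pvExpand q c [c] = [PvAction.call c c, PvAction.post c c] := by
      simp [pvExpand, hq]
    rw [hexp, List.cons_append, List.cons_append, List.nil_append]
    refine (runB_call _ _ _ _ _ _).trans ?_
    rw [hc]
    simp only [Option.getD_some]
    have hexp2 : pvExpand c c [c] = [PvAction.leaf c] := by simp [pvExpand]
    rw [hexp2, List.cons_append, List.nil_append]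
    refine (runB_leaf _ _ _ _ _).trans ?_
    rw [hc]
    simp only [Option.getD_some, List.length_cons, List.length_nil, if_true]
    refine (runB_post _ _ _ _ _ _).trans ?_
    exact pvMono _ _ _ _ _ _ hrun

-- SIMULATION: one recursive call of A corresponds to processing one 'call' action of B's machine
theorem pvSim (vther me : Int) (tree : List (Int × List Int))
    (hme0 : pvLvl tree me me = some 0)
    (hbound : ∀ e ∈ (pvLevels tree me).items, e.2 + 1 ≤ (pvLevels tree me).items.length)
    (hcnt : (pvLevels tree me).items.length ≤ tree.length + 1)
    (hedge : ∀ pair ∈ tree, (pvLvl tree me pair.1).isSome = true →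
      (∀ c ∈ pair.2, ¬(pair.1 = me ∧ c = vther) →
        (PySem.Dict.get? (⟨tree⟩ : PySem.Dict Int (List Int)) c = some [c] ∨
         ((PySem.Dict.get? (⟨tree⟩ : PySem.Dict Int (List Int)) c).isSome = true ∧
          pair.1 ∈ (PySem.Dict.get? (⟨tree⟩ : PySem.Dict Int (List Int)) c).getD [] ∧
          (pvLvl tree me c = some ((pvLvl tree me pair.1).getD 0 + 1) ∨
           ((pvLvl tree me pair.1).getD 0 ≠ 0 ∧
            pvLvl tree me c = some ((pvLvl tree me pair.1).getD 0 - 1)))))) ∧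
      (pair.2.filter (fun c =>
          match pvLvl tree me c, pvLvl tree me pair.1 with
          | some lc, some lp => decide (lc < lp)
          | _, _ => false)).length ≤ 1) :
    ∀ (f : Nat) (n p : Int) (L : Nat) (ns : List Int),
      PySem.Dict.get? (⟨tree⟩ : PySem.Dict Int (List Int)) n = some ns →
      pvLvl tree me n = some L →
      3 * tree.length + 6 ≤ f + 3 * L →
      ((n = me ∧ L = 0 ∧ p = vther) ∨
        (∃ Lp, pvLvl tree me p = some Lp ∧ L = Lp + 1 ∧ p ∈ ns)) →
      ∀ (dt : PySem.Dict Int (List (List (Option Int)))) (rest : List PvAction) (fB : Nat)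
        (r : PySem.Dict Int (List (List (Option Int)))),
        runB fB ⟨tree⟩ rest (goA f p n ⟨tree⟩ dt) = some r →
        runB (fB + (pvTotalDeg tree + 1) ^ f) ⟨tree⟩ (PvAction.call p n :: rest) dt = some r := by
  intro f
  induction f with
  | zero =>
      intro n p L ns hns hlv hfuel _ dt rest fB r _
      have hL1 : L + 1 ≤ (pvLevels tree me).items.length :=
        hbound (n, L) (pvGet?_mem (pvLevels tree me).items n L hlv)
      omega
  | succ f ih =>
      intro n p L ns hns hlv hfuel hpar dt rest fB r hrun
      have hnm : (n, ns) ∈ tree := pvGet?_mem tree n ns hns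
      have hL1 : L + 1 ≤ (pvLevels tree me).items.length :=
        hbound (n, L) (pvGet?_mem (pvLevels tree me).items n L hlv)
      have hf5 : 5 ≤ f := by omega
      have hLsome : (pvLvl tree me (n, ns).1).isSome = true := by
        show (pvLvl tree me n).isSome = true
        rw [hlv]; rfl
      obtain ⟨hE0, hFilt0⟩ := hedge (n, ns) hnm hLsome
      have hE : ∀ c ∈ ns, ¬(n = me ∧ c = vther) →
          (PySem.Dict.get? (⟨tree⟩ : PySem.Dict Int (List Int)) c = some [c] ∨
           ((PySem.Dict.get? (⟨tree⟩ : PySem.Dict Int (List Int)) c).isSome = true ∧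
            n ∈ (PySem.Dict.get? (⟨tree⟩ : PySem.Dict Int (List Int)) c).getD [] ∧
            (pvLvl tree me c = some ((pvLvl tree me n).getD 0 + 1) ∨
             ((pvLvl tree me n).getD 0 ≠ 0 ∧
              pvLvl tree me c = some ((pvLvl tree me n).getD 0 - 1))))) := hE0
      have hFilt : (ns.filter (fun x =>
          match pvLvl tree me x, pvLvl tree me n with
          | some lc, some lp => decide (lc < lp)
          | _, _ => false)).length ≤ 1 := hFilt0
      -- the loop invariant over the remaining suffix of tree[n]
      have loop : ∀ (sub : List Int), (∀ c ∈ sub, c ∈ ns) →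
          ∀ (dt : PySem.Dict Int (List (List (Option Int)))) (rest : List PvAction) (fB : Nat)
            (r : PySem.Dict Int (List (List (Option Int)))),
            runB fB ⟨tree⟩ rest (goLoopA f p n ⟨tree⟩ ns sub dt) = some r →
            runB (fB + sub.length * (pvTotalDeg tree + 1) ^ f) ⟨tree⟩
              (pvExpand p n sub ++ rest) dt = some r := by
        intro sub
        induction sub with
        | nil =>
            intro _ dt rest fB r h
            simpa [pvExpand, goLoopA_nil] using h
        | cons c sub' ihsub =>
            intro hsubset dt rest fB r h
            have hcns : c ∈ ns := hsubset c (List.mem_cons_self ..)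
            have hexp : pvExpand p n (c :: sub') =
                (if c = p then [PvAction.leaf n] else [PvAction.call n c, PvAction.post n c]) ++
                  pvExpand p n sub' := by
              simp [pvExpand]
            by_cases hc : c = p
            · -- my father: possibly record the leaf sentinel, continue the loop
              rw [goLoopA_cons, if_pos hc] at h
              have step := ihsub (fun x hx => hsubset x (List.mem_cons_of_mem _ hx)) _ _ _ _ h
              rw [hexp, if_pos hc]
              have heq : fB + (sub'.length + 1) * (pvTotalDeg tree + 1) ^ f =
                  (fB + sub'.length * (pvTotalDeg tree + 1) ^ f) + (pvTotalDeg tree + 1) ^ f := by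
                ring
              simp only [List.length_cons, heq, List.singleton_append]
              refine pvMono _ _ _ _ _ _ ((runB_leaf _ _ _ _ _).trans ?_)
              rw [hns]
              simp only [Option.getD_some]
              exact step
            · -- a son: A recurses; B runs the pushed 'call' then 'post' actions
              have hguard : ¬(n = me ∧ c = vther) := by
                rintro ⟨hnme, hcv⟩
                rcases hpar with ⟨_, _, hpv⟩ | ⟨Lp, _, hLq, _⟩
                · exact hc (hcv.trans hpv.symm)
                · rw [hnme] at hlv
                  have := hme0.symm.trans hlv
                  simp at this
                  omega
              -- unfold one loop iteration of A
              rw [goLoopA_cons, if_neg hc] at h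
              have step := ihsub (fun x hx => hsubset x (List.mem_cons_of_mem _ hx)) _ _ _ _ h
              -- the 'post' action performs exactly A's per-son update
              have post : runB (fB + sub'.length * (pvTotalDeg tree + 1) ^ f) ⟨tree⟩
                  (PvAction.post n c :: (pvExpand p n sub' ++ rest))
                  (goA f n c ⟨tree⟩ dt) = some r :=
                (runB_post _ _ _ _ _ _).trans step
              have heq : fB + (sub'.length + 1) * (pvTotalDeg tree + 1) ^ f =
                  fB + sub'.length * (pvTotalDeg tree + 1) ^ f + (pvTotalDeg tree + 1) ^ f := by
                ring
              rcases hE c hcns hguard with hself | ⟨hcs, hcmem, hlev⟩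
              · -- self-loop leaf child
                have call := pvSelfCall tree f (by omega) n c hself dt
                  (PvAction.post n c :: (pvExpand p n sub' ++ rest))
                  (fB + sub'.length * (pvTotalDeg tree + 1) ^ f) r post
                rw [hexp, if_neg hc]
                simp only [List.length_cons, heq]
                simpa using call
              · -- proper child, one level deeper
                rw [hlv] at hlev
                simp only [Option.getD_some] at hlev
                obtain ⟨nsc, hnsc⟩ := Option.isSome_iff_exists.mp hcs
                rw [hnsc] at hcmem
                simp only [Option.getD_some] at hcmem
                have hlvc : pvLvl tree me c = some (L + 1) := by
                  rcases hlev with h1 | ⟨hL0, h2⟩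
                  · exact h1
                  · exfalso
                    rcases hpar with ⟨_, hL, _⟩ | ⟨Lp, hLp, hLq, hpns⟩
                    · omega
                    · have hpf : p ∈ ns.filter (fun x =>
                          match pvLvl tree me x, pvLvl tree me n with
                          | some lc, some lp => decide (lc < lp)
                          | _, _ => false) := by
                        rw [List.mem_filter]
                        refine ⟨hpns, ?_⟩
                        rw [hLp, hlv]
                        simp; omega
                      have hcf : c ∈ ns.filter (fun x =>
                          match pvLvl tree me x, pvLvl tree me n with
                          | some lc, some lp => decide (lc < lp)
                          | _, _ => false) := by
                        rw [List.mem_filter]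
                        refine ⟨hcns, ?_⟩
                        rw [h2, hlv]
                        simp; omega
                      have := pvTwoMem hcf hpf hc
                      omega
                have hfuelc : 3 * tree.length + 6 ≤ f + 3 * (L + 1) := by omega
                -- the 'call' action simulates A's recursive call (induction hypothesis on fuel)
                have call := ih c n (L + 1) nsc hnsc hlvc hfuelc
                  (Or.inr ⟨L, hlv, rfl, hcmem⟩) dt
                  (PvAction.post n c :: (pvExpand p n sub' ++ rest))
                  (fB + sub'.length * (pvTotalDeg tree + 1) ^ f) r post
                rw [hexp, if_neg hc]
                simp only [List.length_cons, heq]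
                simpa using call
      -- assemble: one 'call' step of B, then the loop simulation
      rw [goA_succ] at hrun
      simp only [hns, Option.getD_some] at hrun
      have hloop := loop ns (fun _ hx => hx) dt rest fB r hrun
      have hD : ns.length ≤ pvTotalDeg tree := pvDeg_le tree n ns hnm
      have hX1 : 1 ≤ (pvTotalDeg tree + 1) ^ f := Nat.one_le_pow _ _ (by omega)
      have h1 : ns.length * (pvTotalDeg tree + 1) ^ f ≤
          pvTotalDeg tree * (pvTotalDeg tree + 1) ^ f :=
        Nat.mul_le_mul_right _ hD
      have h2 : (pvTotalDeg tree + 1) ^ (f + 1) =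
          pvTotalDeg tree * (pvTotalDeg tree + 1) ^ f + (pvTotalDeg tree + 1) ^ f := by
        rw [pow_succ]; ring
      have hle : fB + ns.length * (pvTotalDeg tree + 1) ^ f + 1 ≤
          fB + (pvTotalDeg tree + 1) ^ (f + 1) := by omega
      obtain ⟨k, hk⟩ := Nat.exists_eq_add_of_le hle
      have hk2 : fB + (pvTotalDeg tree + 1) ^ (f + 1) =
          (fB + ns.length * (pvTotalDeg tree + 1) ^ f + k) + 1 := by omega
      rw [hk2]
      refine (runB_call _ _ _ _ _ _).trans ?_
      rw [hns]
      simp only [Option.getD_some]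
      exact pvMono _ k _ _ _ _ hloop

-- ===== VERDICT (by name: the statement is the Claim_ definition above) =====
theorem buildMaxRelativeDistances_spec : Claim_equal_buildMaxRelativeDistances := by
  intro vther me tree dtnces _ hPre
  obtain ⟨hmeS, hcase⟩ := hPre
  unfold Spec_buildMaxRelativeDistances buildMaxRelativeDistances buildMaxRelativeDistances_alt
  obtain ⟨ns, hns⟩ := Option.isSome_iff_exists.mp hmeS
  rcases hcase with htrv | ⟨hme0, hbound, hcnt, -, hedge⟩
  · -- trivial shape: every neighbour of `me` is `vther`
    rw [hns] at htrv
    simp only [Option.getD_some] at htrv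
    have hpos : 1 ≤ (pvTotalDeg tree + 1) ^ (3 * tree.length + 6) :=
      Nat.one_le_pow _ _ (by omega)
    obtain ⟨K, hK⟩ : ∃ K, (pvTotalDeg tree + 1) ^ (3 * tree.length + 6) = K + 1 :=
      ⟨(pvTotalDeg tree + 1) ^ (3 * tree.length + 6) - 1, by omega⟩
    obtain ⟨g, hg⟩ : ∃ g, 3 * tree.length + 6 = g + 1 := ⟨3 * tree.length + 5, by omega⟩
    rw [hK, hg]
    rw [goA_succ]
    simp only [hns, Option.getD_some]
    rw [runB_call]
    simp only [hns, Option.getD_some]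
    rw [pvTriv vther me tree ns hns ns htrv g K [] ⟨dtnces⟩]
    rw [runB_nil]
    rfl
  · -- tree shape: simulation of the recursion by the action machine
    have hstart : runB 0 (⟨tree⟩ : PySem.Dict Int (List Int)) []
        (goA (3 * tree.length + 6) vther me ⟨tree⟩ ⟨dtnces⟩) =
        some (goA (3 * tree.length + 6) vther me ⟨tree⟩ ⟨dtnces⟩) := runB_nil 0 _ _
    have h := pvSim vther me tree hme0 hbound hcnt hedge (3 * tree.length + 6) me vther 0 ns
      hns hme0 (by omega) (Or.inl ⟨rfl, rfl, rfl⟩) ⟨dtnces⟩ [] 0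
      (goA (3 * tree.length + 6) vther me ⟨tree⟩ ⟨dtnces⟩) hstart
    rw [Nat.zero_add] at h
    rw [h]
    rfl
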